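-- pv_equiv track=rewrite | github.com/Ameer-Jamal/localPilot | main.py | slice_by_lc
-- ===== SOURCE A (Python) =====
-- def slice_by_lc(text: str, s_line: int, s_col: int, e_line: int, e_col: int) -> str:
--     """Lines/cols are 1-based (JetBrains). Column 1 maps to index 0."""
--     lines = text.splitlines(keepends=True)
--     if not lines:
--         return ""
--
--     def to_abs(line_1b: int, col_1b: int) -> int:
--         L = max(1, min(int(line_1b), len(lines)))
--         base = sum(len(x) for x in lines[: L - 1])
--         cur = lines[L - 1]
--         idx = max(0, min(int(col_1b) - 1, len(cur)))
--         return base + idx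
--
--     s = to_abs(s_line, s_col)
--     e = to_abs(e_line, e_col)
--     if e < s:
--         s, e = e, s
--     return text[s:e]
-- ===== SOURCE B (Python) =====
-- def slice_by_lc(text: str, s_line: int, s_col: int, e_line: int, e_col: int) -> str:
--     """Lines/cols are 1-based (JetBrains). Column 1 maps to index 0.
--     Prefix-sum table: each (line,col) becomes a clamped absolute offset in O(1)."""
--     prefix = [0]
--     for ln in text.splitlines(keepends=True):
--         prefix.append(prefix[-1] + len(ln))
--     n = len(prefix) - 1
--     if n == 0:
--         return ""
--
--     def to_abs(line_1b: int, col_1b: int) -> int: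
--         L = min(max(int(line_1b), 1), n)
--         return min(max(prefix[L - 1] + int(col_1b) - 1, prefix[L - 1]), prefix[L])
--
--     s = to_abs(s_line, s_col)
--     e = to_abs(e_line, e_col)
--     if e < s:
--         s, e = e, s
--     return text[s:e]
-- ===== Notes on version B (the rewrite author's own statement) =====
-- stated objective: alternative
-- what changed: B builds one prefix-sum table of line lengths and turns each (line,col) endpoint into a clamped absolute offset with two O(1) table lookups, instead of A's per-endpoint list slice plus sum over the preceding lines.
import Mathlib
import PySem

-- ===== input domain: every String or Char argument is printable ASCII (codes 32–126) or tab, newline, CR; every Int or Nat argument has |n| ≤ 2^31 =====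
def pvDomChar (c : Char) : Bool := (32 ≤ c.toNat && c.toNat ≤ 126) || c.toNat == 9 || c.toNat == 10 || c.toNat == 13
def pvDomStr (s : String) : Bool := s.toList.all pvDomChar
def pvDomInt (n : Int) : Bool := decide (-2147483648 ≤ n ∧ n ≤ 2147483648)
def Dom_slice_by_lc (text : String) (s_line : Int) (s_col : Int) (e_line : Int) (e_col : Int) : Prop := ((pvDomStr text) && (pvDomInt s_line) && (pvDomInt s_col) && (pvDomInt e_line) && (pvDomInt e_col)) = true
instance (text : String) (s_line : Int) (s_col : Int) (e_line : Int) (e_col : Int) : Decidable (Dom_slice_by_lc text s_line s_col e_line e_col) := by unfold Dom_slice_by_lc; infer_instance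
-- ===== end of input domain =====

-- B replaces A's per-endpoint slice-and-sum with one prefix-sum table and O(1) clamped lookups (alternative decomposition).

-- shared helper: text.splitlines(keepends=True); hand-ported, exact for line boundaries
-- '\n', '\r', '\r\n' (the only line boundaries among printable ASCII + tab/newline/CR)
def pvSplitlinesKeepAux : List Char → List Char → List (List Char)
  | acc, [] => if acc.isEmpty then [] else [acc.reverse]
  | acc, '\r' :: '\n' :: rest => (acc.reverse ++ ['\r', '\n']) :: pvSplitlinesKeepAux [] rest
  | acc, '\r' :: rest => (acc.reverse ++ ['\r']) :: pvSplitlinesKeepAux [] rest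
  | acc, '\n' :: rest => (acc.reverse ++ ['\n']) :: pvSplitlinesKeepAux [] rest
  | acc, c :: rest => pvSplitlinesKeepAux (c :: acc) rest

def pvSplitlinesKeep (cs : List Char) : List (List Char) := pvSplitlinesKeepAux [] cs

-- ===== PORT A =====
-- A's to_abs: clamp the line, SUM the lengths of the lines before it, clamp the column
def pvToAbsA (lines : List (List Char)) (line_1b col_1b : Int) : Int :=
  let L : Int := max 1 (min line_1b (lines.length : Int))
  let base : Int := ((PySem.List.slice lines none (some (L - 1))).map (fun x => (x.length : Int))).sum
  let cur : List Char := (PySem.List.pyGet? lines (L - 1)).getD []   -- lines[L-1]; always in range here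
  let idx : Int := max 0 (min (col_1b - 1) (cur.length : Int))
  base + idx

def slice_by_lc (text : String) (s_line : Int) (s_col : Int) (e_line : Int) (e_col : Int) : String :=
  let lines := pvSplitlinesKeep text.toList
  if lines.isEmpty then "" else
  let s := pvToAbsA lines s_line s_col
  let e := pvToAbsA lines e_line e_col
  let p := if e < s then (e, s) else (s, e)
  PySem.Str.slice text (some p.1) (some p.2)

-- ===== PORT B =====
-- prefix[i] = total length of the first i lines; built once by B's loop
def pvPrefix (lines : List (List Char)) : List Int :=
  lines.foldl (fun p ln => p ++ [p.getLast! + (ln.length : Int)]) [0]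

-- B's to_abs: one clamped O(1) lookup in the prefix table
def pvToAbsB (pre : List Int) (n : Int) (line_1b col_1b : Int) : Int :=
  let L : Int := min (max line_1b 1) n
  let a : Int := (PySem.List.pyGet? pre (L - 1)).getD 0
  let b : Int := (PySem.List.pyGet? pre L).getD 0
  min (max (a + col_1b - 1) a) b

def slice_by_lc_alt (text : String) (s_line : Int) (s_col : Int) (e_line : Int) (e_col : Int) : String :=
  let pre := pvPrefix (pvSplitlinesKeep text.toList)
  let n : Int := (pre.length : Int) - 1
  if n = 0 then "" else
  let s := pvToAbsB pre n s_line s_col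
  let e := pvToAbsB pre n e_line e_col
  let p := if e < s then (e, s) else (s, e)
  PySem.Str.slice text (some p.1) (some p.2)

-- ===== PRECONDITION & SPEC =====
def Spec_slice_by_lc (text : String) (s_line : Int) (s_col : Int) (e_line : Int) (e_col : Int) (out : String) : Prop := out = slice_by_lc_alt text s_line s_col e_line e_col
instance (text : String) (s_line : Int) (s_col : Int) (e_line : Int) (e_col : Int) (out : String) : Decidable (Spec_slice_by_lc text s_line s_col e_line e_col out) := by unfold Spec_slice_by_lc; infer_instance

-- ===== CLAIM (what is proved, stated in full; the proofs are below) =====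
def Claim_equal_slice_by_lc : Prop := ∀ (text : String) (s_line : Int) (s_col : Int) (e_line : Int) (e_col : Int), Dom_slice_by_lc text s_line s_col e_line e_col → Spec_slice_by_lc text s_line s_col e_line e_col (slice_by_lc text s_line s_col e_line e_col)

-- ===== LEMMAS AND PROOFS =====

def pvF : Int → List Char → Int := fun acc ln => acc + (ln.length : Int)

lemma pvGetLast_concat (init : List Int) (a : Int) : (init ++ [a]).getLast! = a := by
  induction init with
  | nil => rfl
  | cons x xs ih =>
    cases xs with
    | nil => rfl
    | cons y ys => simp [List.getLast!, List.getLast]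

lemma pvFoldl_scan (ls : List (List Char)) (init : List Int) (a : Int) :
    List.foldl (fun p ln => p ++ [p.getLast! + (ln.length : Int)]) (init ++ [a]) ls
      = init ++ List.scanl pvF a ls := by
  induction ls generalizing init a with
  | nil => simp [List.scanl]
  | cons x xs ih =>
    simp only [List.foldl_cons, List.scanl_cons, pvGetLast_concat]
    rw [ih (init ++ [a]) (a + (x.length : Int))]
    simp [pvF]

lemma pvScanl_get (ls : List (List Char)) (a : Int) (i : Nat) (h : i ≤ ls.length) :
    (List.scanl pvF a ls)[i]? = some (a + ((ls.take i).map (fun x => (x.length : Int))).sum) := by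
  induction ls generalizing a i with
  | nil =>
    simp only [List.length_nil, Nat.le_zero] at h
    subst h
    simp [List.scanl]
  | cons x xs ih =>
    cases i with
    | zero => simp [List.scanl_cons]
    | succ j =>
      simp only [List.scanl_cons, List.getElem?_cons_succ, List.take_succ_cons, List.map_cons,
        List.sum_cons]
      rw [ih (pvF a x) j (by simpa using h)]
      simp [pvF]
      ring

lemma pvPrefix_eq (lines : List (List Char)) : pvPrefix lines = List.scanl pvF 0 lines := by
  unfold pvPrefix
  rw [show ([0] : List Int) = [] ++ [0] from rfl, pvFoldl_scan]
  rw [List.nil_append]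

lemma pvPrefix_length (lines : List (List Char)) : (pvPrefix lines).length = lines.length + 1 := by
  simp [pvPrefix_eq, List.length_scanl]

lemma pvPrefix_get (lines : List (List Char)) (i : Nat) (h : i ≤ lines.length) :
    (pvPrefix lines)[i]? = some (((lines.take i).map (fun x => (x.length : Int))).sum) := by
  rw [pvPrefix_eq, pvScanl_get lines 0 i h]; ring_nf

lemma pvToAbs_eq (lines : List (List Char)) (h : lines ≠ []) (line col : Int) :
    pvToAbsA lines line col = pvToAbsB (pvPrefix lines) (lines.length : Int) line col := by
  have hn : 1 ≤ (lines.length : Int) := by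
    have := List.length_pos_of_ne_nil h; omega
  set L : Int := max 1 (min line (lines.length : Int)) with hL
  have hL' : min (max line 1) (lines.length : Int) = L := by omega
  have hL1 : 1 ≤ L := by omega
  have hLn : L ≤ (lines.length : Int) := by omega
  obtain ⟨i, hi⟩ : ∃ i : Nat, L - 1 = (i : Int) := ⟨(L-1).toNat, by omega⟩
  have hilt : i < lines.length := by omega
  have hLi : L = ((i : Int) + 1) := by omega
  -- A's pieces
  have hbase : PySem.List.slice lines none (some (L - 1)) = lines.take i := by
    rw [hi, PySem.List.slice_to_natCast]
  have hcur : PySem.List.pyGet? lines (L - 1) = lines[i]? := by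
    rw [hi, PySem.List.pyGet?_natCast]
  -- B's pieces
  have ha : (pvPrefix lines)[i]? = some (((lines.take i).map (fun x => (x.length : Int))).sum) :=
    pvPrefix_get lines i (by omega)
  have hb : (pvPrefix lines)[i+1]? = some (((lines.take (i+1)).map (fun x => (x.length : Int))).sum) :=
    pvPrefix_get lines (i+1) (by omega)
  have hsum : ((lines.take (i+1)).map (fun x => (x.length : Int))).sum
      = ((lines.take i).map (fun x => (x.length : Int))).sum + ((lines[i]'hilt).length : Int) := by
    rw [List.take_add_one, List.getElem?_eq_getElem hilt]
    rw [List.map_append, List.sum_append]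
    simp
  simp only [pvToAbsA, pvToAbsB, hL']
  rw [hi]
  rw [show L = ((i+1 : Nat) : Int) by push_cast; omega]
  rw [PySem.List.slice_to_natCast]
  simp only [PySem.List.pyGet?_natCast]
  rw [ha, hb]
  simp only [List.getElem?_eq_getElem hilt, Option.getD_some, hsum]
  omega

-- ===== VERDICT (by name: the statement is the Claim_ definition above) =====
theorem slice_by_lc_spec : Claim_equal_slice_by_lc := by
  intro text sl sc el ec _
  unfold Spec_slice_by_lc slice_by_lc slice_by_lc_alt
  set lines := pvSplitlinesKeep text.toList with hl
  by_cases h : lines = []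
  · simp [h, pvPrefix]
  · have hlen := List.length_pos_of_ne_nil h
    have hne : lines.isEmpty = false := by simp [h]
    have hnn : ((pvPrefix lines).length : Int) - 1 = (lines.length : Int) := by
      rw [pvPrefix_length]; push_cast; omega
    have hn0 : ¬ (((pvPrefix lines).length : Int) - 1 = 0) := by rw [hnn]; omega
    simp only [hne, Bool.false_eq_true, if_false, if_neg hn0]
    rw [hnn, ← pvToAbs_eq lines h sl sc, ← pvToAbs_eq lines h el ec]
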